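-- pv_equiv track=rewrite | github.com/Bobinar/aoc2020 | day14.py | modify_value_with_mask_p2
-- ===== SOURCE A (Python) =====
-- def modify_value_with_mask_p2(value,mask):
--     result = ''
--     length = len(mask)
--
--     for i in range(length):
--         index = length - i - 1
--         if mask[index] == '0':
--             value_index = len(value) - i - 1
--             if value_index >= 0:
--                 result = value[value_index] + result
--             else:
--                 result = '0' + result
--         else:
--             result = mask[index] + result
--     return result
-- ===== SOURCE B (Python) =====
-- def modify_value_with_mask_p2(value, mask):
--     # right-align value to the mask length once, then combine in one forward pass
--     padded = value.rjust(len(mask), '0')[-len(mask):]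
--     return ''.join(m if m != '0' else v for m, v in zip(mask, padded))
-- ===== Notes on version B (the rewrite author's own statement) =====
-- stated objective: faster
-- what changed: Replaces the reverse-index loop with its per-iteration bounds check and quadratic string prepending by a one-shot rjust/slice alignment followed by a single forward zip-join pass.
import Mathlib
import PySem

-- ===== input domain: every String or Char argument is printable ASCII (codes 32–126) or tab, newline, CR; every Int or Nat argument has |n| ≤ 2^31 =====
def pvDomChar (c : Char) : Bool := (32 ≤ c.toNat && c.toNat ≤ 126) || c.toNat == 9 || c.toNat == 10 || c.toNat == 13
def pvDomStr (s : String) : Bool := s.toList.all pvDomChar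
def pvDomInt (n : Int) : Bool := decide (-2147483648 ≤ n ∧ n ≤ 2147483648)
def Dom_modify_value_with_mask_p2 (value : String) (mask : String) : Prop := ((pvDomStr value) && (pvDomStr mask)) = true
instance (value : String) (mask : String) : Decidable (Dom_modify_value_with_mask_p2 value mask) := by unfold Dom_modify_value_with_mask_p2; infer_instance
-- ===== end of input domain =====

-- B replaces A's reverse-index loop (bounds check and string prepend each iteration) by a
-- one-shot right alignment (rjust + slice) followed by a single forward zip-join pass (idiomatic).

-- ===== PORT A =====
-- literal port of A's loop; the mask/value indexings are always in range when reached
-- (index ∈ [0, len mask), and value_index < len value with value_index ≥ 0 guarded), so pyGetD is exact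
def modify_value_with_mask_p2 (value : String) (mask : String) : String :=
  let vv := value.toList
  let mv := mask.toList
  let length := mv.length
  String.ofList ((PySem.List.pyRange 0 (length : Int) 1).foldl (fun result i =>
    let index := (length : Int) - i - 1
    if PySem.List.pyGetD mv index ' ' = '0' then
      let value_index := (vv.length : Int) - i - 1
      if value_index ≥ 0 then
        PySem.List.pyGetD vv value_index ' ' :: result
      else
        '0' :: result
    else
      PySem.List.pyGetD mv index ' ' :: result) [])

-- ===== PORT B =====
def modify_value_with_mask_p2_alt (value : String) (mask : String) : String :=
  let vv := value.toList
  let mv := mask.toList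
  -- value.rjust(len(mask), '0')[-len(mask):]
  let rj := List.replicate (mv.length - vv.length) '0' ++ vv
  let padded := PySem.List.slice rj (some (-(mv.length : Int))) none
  String.ofList ((mv.zip padded).map (fun p => if p.1 ≠ '0' then p.1 else p.2))

-- ===== PRECONDITION & SPEC =====
def Spec_modify_value_with_mask_p2 (value : String) (mask : String) (out : String) : Prop := out = modify_value_with_mask_p2_alt value mask
instance (value : String) (mask : String) (out : String) : Decidable (Spec_modify_value_with_mask_p2 value mask out) := by unfold Spec_modify_value_with_mask_p2; infer_instance

-- ===== CLAIM (what is proved, stated in full; the proofs are below) =====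
def Claim_equal_modify_value_with_mask_p2 : Prop := ∀ (value : String) (mask : String), Dom_modify_value_with_mask_p2 value mask → Spec_modify_value_with_mask_p2 value mask (modify_value_with_mask_p2 value mask)

-- ===== LEMMAS AND PROOFS =====

-- a prepend-fold builds the reversed map
theorem foldl_cons_eq_reverse_map {α β : Type} (g : α → β) (l : List α) (acc : List β) :
    l.foldl (fun r i => g i :: r) acc = (l.map g).reverse ++ acc := by
  induction l generalizing acc with
  | nil => rfl
  | cons x xs ih => simp [List.foldl_cons, ih]

-- A's loop body, with the prepend hoisted out of the branches
def pvStepA (vv mv : List Char) (i : Int) : Char :=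
  let index := (mv.length : Int) - i - 1
  if PySem.List.pyGetD mv index ' ' = '0' then
    if (vv.length : Int) - i - 1 ≥ 0 then PySem.List.pyGetD vv ((vv.length : Int) - i - 1) ' '
    else '0'
  else PySem.List.pyGetD mv index ' '

-- the characterisation: A's reversed fold is B's zip-map over the aligned value
theorem pvKey (vv mv : List Char) :
    ((PySem.List.pyRange 0 (mv.length : Int) 1).map (pvStepA vv mv)).reverse
    = (mv.zip ((List.replicate (mv.length - vv.length) '0' ++ vv).drop
        ((List.replicate (mv.length - vv.length) '0' ++ vv).length - mv.length))).map
        (fun p => if p.1 ≠ '0' then p.1 else p.2) := by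
  apply List.ext_getElem
  · simp [PySem.List.length_pyRange_one]
    omega
  · intro j h1 h2
    have hj : j < mv.length := by
      simpa [PySem.List.length_pyRange_one] using h1
    rw [List.getElem_reverse, List.getElem_map, PySem.List.getElem_pyRange_one,
      List.getElem_map, List.getElem_zip]
    simp only [List.length_map, PySem.List.length_pyRange_one, Int.sub_zero, Int.toNat_natCast,
      zero_add]
    have hicast : ((mv.length - 1 - j : Nat) : Int) = (mv.length : Int) - 1 - (j : Int) := by
      omega
    simp only [pvStepA, hicast]
    have hmvj : PySem.List.pyGetD mv ((mv.length : Int) - ((mv.length : Int) - 1 - (j:Int)) - 1) ' '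
        = mv[j] := by
      rw [show (mv.length : Int) - ((mv.length : Int) - 1 - (j:Int)) - 1 = ((j : Nat) : Int) by omega,
        PySem.List.pyGetD_natCast, List.getD_eq_getElem?_getD, List.getElem?_eq_getElem hj,
        Option.getD_some]
    rw [hmvj, List.getElem_drop]
    by_cases hm0 : mv[j] = '0'
    · -- mask bit '0': result takes the aligned value bit (or pad '0')
      rw [if_pos hm0, if_neg (show ¬ mv[j] ≠ '0' by simp [hm0])]
      by_cases hcase : mv.length ≤ vv.length + j
      · -- the aligned position falls inside value
        rw [if_pos (show (vv.length : Int) - ((mv.length : Int) - 1 - (j:Int)) - 1 ≥ 0 by omega)]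
        rw [show (vv.length : Int) - ((mv.length : Int) - 1 - (j:Int)) - 1
            = ((vv.length + j - mv.length : Nat) : Int) by omega,
          PySem.List.pyGetD_natCast, List.getD_eq_getElem?_getD,
          List.getElem?_eq_getElem (show vv.length + j - mv.length < vv.length by omega),
          Option.getD_some]
        by_cases hkn : vv.length ≤ mv.length
        · rw [List.getElem_append_right (by simp; omega)]
          simp only [List.length_replicate]
          simp only [show (List.replicate (mv.length - vv.length) '0' ++ vv).length - mv.length + j
              - (mv.length - vv.length) = vv.length + j - mv.length by simp; omega]
        · simp only [show mv.length - vv.length = 0 by omega, List.replicate_zero,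
            List.nil_append]
          simp only [show vv.length - mv.length + j = vv.length + j - mv.length by omega]
      · -- value too short here: both sides pad with '0'
        rw [if_neg (show ¬ ((vv.length : Int) - ((mv.length : Int) - 1 - (j:Int)) - 1 ≥ 0) by omega)]
        rw [List.getElem_append_left (by simp; omega), List.getElem_replicate]
    · -- mask bit kept
      rw [if_neg hm0, if_pos (show mv[j] ≠ '0' from hm0)]

-- ===== VERDICT (by name: the statement is the Claim_ definition above) =====
theorem modify_value_with_mask_p2_spec : Claim_equal_modify_value_with_mask_p2 := by
  intro value mask _
  unfold Spec_modify_value_with_mask_p2 modify_value_with_mask_p2 modify_value_with_mask_p2_alt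
  dsimp only
  have hstep : (fun (result : List Char) (i : Int) =>
      let index := (mask.toList.length : Int) - i - 1
      if PySem.List.pyGetD mask.toList index ' ' = '0' then
        let value_index := (value.toList.length : Int) - i - 1
        if value_index ≥ 0 then PySem.List.pyGetD value.toList value_index ' ' :: result
        else '0' :: result
      else PySem.List.pyGetD mask.toList index ' ' :: result)
      = (fun r i => pvStepA value.toList mask.toList i :: r) := by
    funext r i
    simp only [pvStepA]
    split_ifs <;> rfl
  rcases Nat.eq_zero_or_pos mask.toList.length with h0 | hpos
  · have hnil : mask.toList = [] := List.eq_nil_of_length_eq_zero h0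
    simp [hnil, PySem.List.pyRange_one_eq_nil]
  · rw [hstep, foldl_cons_eq_reverse_map, List.append_nil,
      PySem.List.slice_from_neg_natCast _ _ hpos]
    exact congrArg String.ofList (pvKey value.toList mask.toList)
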